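-- pv_equiv track=rewrite | github.com/ruziniuuuuu/niukb | Code/PyAcmEnv/dewu/dewu1.py | func
-- ===== SOURCE A (Python) =====
-- def func(n, m, k, apples):
--     apple_infos = dict()
--     for i in range(m):
--         pos, h = apples[i]
--         if pos not in apple_infos:
--             apple_infos[pos] = []
--         apple_infos[pos].append(h)
--
--     max_get = 0
--     for _, apple_hs in apple_infos.items():
--         apple_hs.sort()
--         left = 0
--         current_max = 0
--         for right in range(len(apple_hs)):
--             while apple_hs[right] - apple_hs[left] > k:
--                 left += 1
--             current_max = max(current_max, right - left + 1)
--         max_get += current_max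
--
--     return max_get
-- ===== SOURCE B (Python) =====
-- def func(n, m, k, apples):
--     groups = {}
--     for i in range(m):
--         pos, h = apples[i]
--         groups.setdefault(pos, []).append(h)
--     total = 0
--     for hs in groups.values():
--         hs.sort()
--         best = 0
--         for right in range(len(hs)):
--             target = hs[right] - k
--             lo, hi = 0, right
--             while lo < hi:
--                 mid = (lo + hi) // 2
--                 if hs[mid] < target:
--                     lo = mid + 1
--                 else:
--                     hi = mid
--             best = max(best, right - lo + 1)
--         total += best
--     return total
-- ===== Notes on version B (the rewrite author's own statement) =====
-- stated objective: alternative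
-- what changed: The per-position window maximum is computed by a per-element hand-written binary search (bisect_left) over the sorted heights instead of A's monotone two-pointer sliding window, and the grouping loop uses dict.setdefault instead of a membership test plus separate insertion.
import Mathlib
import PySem

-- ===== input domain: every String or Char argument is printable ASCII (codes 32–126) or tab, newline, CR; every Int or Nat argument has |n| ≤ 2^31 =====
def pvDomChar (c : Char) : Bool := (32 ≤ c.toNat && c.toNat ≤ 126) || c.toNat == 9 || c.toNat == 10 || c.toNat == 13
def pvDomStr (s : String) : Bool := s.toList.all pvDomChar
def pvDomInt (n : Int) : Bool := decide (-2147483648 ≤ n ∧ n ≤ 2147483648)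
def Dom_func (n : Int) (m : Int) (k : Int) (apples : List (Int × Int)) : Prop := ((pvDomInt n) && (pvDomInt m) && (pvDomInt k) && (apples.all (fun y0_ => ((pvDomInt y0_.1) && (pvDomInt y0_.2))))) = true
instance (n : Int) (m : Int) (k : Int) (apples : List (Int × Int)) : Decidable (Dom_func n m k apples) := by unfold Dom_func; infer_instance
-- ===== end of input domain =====

-- B replaces A's monotone two-pointer sliding window by a per-element binary search over the
-- sorted group (alternative algorithm, same asymptotic cost). A mutates its local dict's lists
-- (sort in place) but never its arguments, so return-value equivalence is the whole story.

-- ===== PORT A =====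
-- the 'while apple_hs[right] - apple_hs[left] > k: left += 1' loop; fuel bounds the iterations
-- (inside Pre_ the loop stops at an index ≤ right < len, so fuel = len suffices and every
--  hs[left] access is in range; getD is exact there)
def funcAdvance (hs : List Int) (k rv : Int) : Nat → Nat → Nat
  | 0, left => left
  | fuel + 1, left => if k < rv - hs.getD left 0 then funcAdvance hs k rv fuel (left + 1) else left

-- the per-group body of A's second loop: sort, then the two-pointer window scan
def funcInner (k : Int) (hs0 : List Int) : Int :=
  let hs := PySem.List.sorted hs0 (fun x => x)
  ((List.range hs.length).foldl (fun (st : Nat × Int) r =>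
      let left := funcAdvance hs k (hs.getD r 0) hs.length st.1
      (left, max st.2 ((r : Int) - (left : Int) + 1))) (0, 0)).2

-- the body of A's first loop: 'if pos not in apple_infos: apple_infos[pos] = []' then
-- 'apple_infos[pos].append(h)' (in-place append = Dict.modify)
def funcDictStep (d : PySem.Dict Int (List Int)) (ph : Int × Int) : PySem.Dict Int (List Int) :=
  let d1 := if d.contains ph.1 then d else d.insert ph.1 []
  d1.modify ph.1 [] (fun hs => hs ++ [ph.2])

def func (n : Int) (m : Int) (k : Int) (apples : List (Int × Int)) : Int :=
  let infos := (PySem.List.pyRange 0 m 1).foldl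
    (fun d i => funcDictStep d (PySem.List.pyGetD apples i (0, 0))) PySem.Dict.empty
    -- apples[i] is in range inside Pre_
  infos.items.foldl (fun acc pr => acc + funcInner k pr.2) 0

-- ===== PORT B =====
-- hand-written binary search of Source B: first index in [lo, hi) whose value is ≥ target, else hi
-- ((lo+hi)//2 on the nonnegative ints lo,hi is exactly Nat division); the 'while lo < hi' loop
-- shrinks hi-lo each pass, so fuel = the initial hi is always enough
def funcAltBisect (hs : List Int) (target : Int) : Nat → Nat → Nat → Nat
  | 0, lo, _ => lo
  | fuel + 1, lo, hi =>
    if lo < hi then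
      let mid := (lo + hi) / 2
      if hs.getD mid 0 < target then funcAltBisect hs target fuel (mid + 1) hi
      else funcAltBisect hs target fuel lo mid
    else lo

-- the per-group body of B's second loop: sort, then one binary search per right end
def funcAltInner (k : Int) (hs0 : List Int) : Int :=
  let hs := PySem.List.sorted hs0 (fun x => x)
  (List.range hs.length).foldl (fun best r =>
      let lo := funcAltBisect hs (hs.getD r 0 - k) r 0 r
      max best ((r : Int) - (lo : Int) + 1)) 0

def func_alt (n : Int) (m : Int) (k : Int) (apples : List (Int × Int)) : Int :=
  -- 'groups.setdefault(pos, []).append(h)' = Dict.modify with default []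
  let groups := (PySem.List.pyRange 0 m 1).foldl
    (fun d i => let ph := PySem.List.pyGetD apples i (0, 0)
                d.modify ph.1 [] (fun hs => hs ++ [ph.2])) PySem.Dict.empty
    -- apples[i] is in range inside Pre_
  groups.values.foldl (fun total hs => total + funcAltInner k hs) 0

-- ===== PRECONDITION & SPEC =====
-- Pre_ excludes exactly the inputs on which A raises IndexError: m > len(apples) (apples[i]
-- overruns), and k < 0 with m ≥ 1 (the window pointer always runs past the end of the last group).
def Pre_func (n : Int) (m : Int) (k : Int) (apples : List (Int × Int)) : Prop :=
  m ≤ (apples.length : Int) ∧ (m ≤ 0 ∨ 0 ≤ k)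
instance (n : Int) (m : Int) (k : Int) (apples : List (Int × Int)) : Decidable (Pre_func n m k apples) := by unfold Pre_func; infer_instance
def pvWitness_func : Int × Int × Int × (List (Int × Int)) := (5, 3, 2, [(1, 1), (1, 2), (2, 5)])

def Spec_func (n : Int) (m : Int) (k : Int) (apples : List (Int × Int)) (out : Int) : Prop := out = func_alt n m k apples
instance (n : Int) (m : Int) (k : Int) (apples : List (Int × Int)) (out : Int) : Decidable (Spec_func n m k apples out) := by unfold Spec_func; infer_instance

-- ===== CLAIM (what is proved, stated in full; the proofs are below) =====
def Claim_equal_func : Prop := ∀ (n : Int) (m : Int) (k : Int) (apples : List (Int × Int)), Dom_func n m k apples → Pre_func n m k apples → Spec_func n m k apples (func n m k apples)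

-- ===== LEMMAS AND PROOFS =====

-- s is sorted: getD is monotone on in-range indices
def pvMono (s : List Int) : Prop := ∀ p q : Nat, p ≤ q → q < s.length → s.getD p 0 ≤ s.getD q 0

theorem pvMono_sorted (hs0 : List Int) : pvMono (PySem.List.sorted hs0 (fun x => x)) := by
  intro p q hpq hq
  rcases Nat.eq_or_lt_of_le hpq with rfl | h
  · exact le_refl _
  · have hp : p < (PySem.List.sorted hs0 (fun x => x)).length := lt_trans h hq
    rw [List.getD_eq_getElem _ _ hp, List.getD_eq_getElem _ _ hq]
    exact (List.pairwise_iff_getElem.mp (PySem.List.sorted_pairwise hs0 (fun x => x))) p q hp hq h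

-- the binary search returns the first index in [lo, hi) with value ≥ target (hi if none)
theorem pvBisect_spec (s : List Int) (hm : pvMono s) (target : Int) :
    ∀ fuel lo hi, lo ≤ hi → hi ≤ s.length → hi - lo ≤ fuel →
      lo ≤ funcAltBisect s target fuel lo hi ∧ funcAltBisect s target fuel lo hi ≤ hi ∧
      (∀ j, lo ≤ j → j < funcAltBisect s target fuel lo hi → s.getD j 0 < target) ∧
      (∀ j, funcAltBisect s target fuel lo hi ≤ j → j < hi → target ≤ s.getD j 0) := by
  intro fuel
  induction fuel with
  | zero =>
    intro lo hi h1 h2 h3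
    have hlh : lo = hi := by omega
    simp only [funcAltBisect]
    exact ⟨le_refl _, by omega, fun j hj1 hj2 => absurd hj2 (by omega),
           fun j hj1 hj2 => absurd hj2 (by omega)⟩
  | succ f ih =>
    intro lo hi h1 h2 h3
    by_cases hlt : lo < hi
    · simp only [funcAltBisect, if_pos hlt]
      by_cases hv : s.getD ((lo + hi) / 2) 0 < target
      · simp only [if_pos hv]
        obtain ⟨a, b, c, d⟩ := ih ((lo + hi) / 2 + 1) hi (by omega) h2 (by omega)
        refine ⟨by omega, b, ?_, d⟩
        intro j hj1 hj2
        by_cases hjm : j ≤ (lo + hi) / 2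
        · exact lt_of_le_of_lt (hm j ((lo + hi) / 2) hjm (by omega)) hv
        · exact c j (by omega) hj2
      · simp only [if_neg hv]
        obtain ⟨a, b, c, d⟩ := ih lo ((lo + hi) / 2) (by omega) (by omega) (by omega)
        refine ⟨a, by omega, c, ?_⟩
        intro j hj1 hj2
        by_cases hjm : (lo + hi) / 2 ≤ j
        · exact le_trans (not_lt.mp hv) (hm ((lo + hi) / 2) j hjm (by omega))
        · exact d j hj1 (by omega)
    · simp only [funcAltBisect, if_neg hlt]
      exact ⟨le_refl _, by omega, fun j hj1 hj2 => absurd hj2 (by omega),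
             fun j hj1 hj2 => absurd hj2 (by omega)⟩

-- the two-pointer advance returns the first index with value ≥ rv - k, given one exists at r
theorem pvAdvance_spec (s : List Int) (hm : pvMono s) (k rv : Int) :
    ∀ fuel left r, left ≤ r → r < s.length → rv - k ≤ s.getD r 0 → r + 1 - left ≤ fuel →
      left ≤ funcAdvance s k rv fuel left ∧ funcAdvance s k rv fuel left ≤ r ∧
      (∀ j, left ≤ j → j < funcAdvance s k rv fuel left → s.getD j 0 < rv - k) ∧
      rv - k ≤ s.getD (funcAdvance s k rv fuel left) 0 := by
  intro fuel
  induction fuel with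
  | zero => intro left r h1 _ _ h4; omega
  | succ f ih =>
    intro left r h1 hr h2 h3
    by_cases hc : k < rv - s.getD left 0
    · have hlr : left ≠ r := by
        intro h; rw [h] at hc; omega
      obtain ⟨a, b, c, d⟩ := ih (left + 1) r (by omega) hr h2 (by omega)
      simp only [funcAdvance, if_pos hc]
      refine ⟨by omega, b, ?_, d⟩
      intro j hj1 hj2
      rcases Nat.eq_or_lt_of_le hj1 with rfl | hj
      · omega
      · exact c j (by omega) hj2
    · simp only [funcAdvance, if_neg hc]
      exact ⟨le_refl _, h1, fun j hj1 hj2 => absurd hj2 (by omega), by omega⟩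

-- "first index with value ≥ t" is unique
theorem pvFirst_unique (s : List Int) (t : Int) (i₁ i₂ : Nat)
    (h1a : ∀ j, j < i₁ → s.getD j 0 < t) (h1b : t ≤ s.getD i₁ 0)
    (h2a : ∀ j, j < i₂ → s.getD j 0 < t) (h2b : t ≤ s.getD i₂ 0) : i₁ = i₂ := by
  rcases Nat.lt_trichotomy i₁ i₂ with h | h | h
  · exact absurd (h2a i₁ h) (not_lt.mpr h1b)
  · exact h
  · exact absurd (h1a i₂ h) (not_lt.mpr h2b)

-- B's per-right binary search, characterized globally (k ≥ 0)
theorem pvF_spec (s : List Int) (hm : pvMono s) (k : Int) (hk : 0 ≤ k) (r : Nat) (hr : r < s.length) :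
    (∀ j, j < funcAltBisect s (s.getD r 0 - k) r 0 r → s.getD j 0 < s.getD r 0 - k) ∧
    s.getD r 0 - k ≤ s.getD (funcAltBisect s (s.getD r 0 - k) r 0 r) 0 ∧
    funcAltBisect s (s.getD r 0 - k) r 0 r ≤ r := by
  obtain ⟨a, b, c, d⟩ := pvBisect_spec s hm (s.getD r 0 - k) r 0 r (by omega) (by omega) (by omega)
  refine ⟨fun j hj => c j (by omega) hj, ?_, b⟩
  rcases Nat.eq_or_lt_of_le b with h | h
  · rw [h]; omega
  · exact d _ (le_refl _) h

-- A's left pointer, stepped from its previous value, lands on B's binary-search index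
def pvP (s : List Int) (k : Int) : Nat → Nat
  | 0 => 0
  | t + 1 => funcAltBisect s (s.getD t 0 - k) t 0 t

theorem pvStep (s : List Int) (hm : pvMono s) (k : Int) (hk : 0 ≤ k) (t : Nat) (ht : t < s.length) :
    funcAdvance s k (s.getD t 0) s.length (pvP s k t) = funcAltBisect s (s.getD t 0 - k) t 0 t := by
  have hPle : pvP s k t ≤ t := by
    cases t with
    | zero => simp [pvP]
    | succ u =>
      have := (pvF_spec s hm k hk u (by omega)).2.2
      simp only [pvP]
      omega
  have hPlt : ∀ j, j < pvP s k t → s.getD j 0 < s.getD t 0 - k := by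
    cases t with
    | zero => intro j hj; simp [pvP] at hj
    | succ u =>
      intro j hj
      have h1 := (pvF_spec s hm k hk u (by omega)).1 j (by simpa [pvP] using hj)
      have h2 : s.getD u 0 ≤ s.getD (u + 1) 0 := hm u (u + 1) (by omega) ht
      omega
  obtain ⟨a, b, c, d⟩ := pvAdvance_spec s hm k (s.getD t 0) s.length (pvP s k t) t hPle ht
    (by omega) (by omega)
  obtain ⟨a', b', c'⟩ := pvF_spec s hm k hk t ht
  refine pvFirst_unique s (s.getD t 0 - k) _ _ ?_ d a' b'
  intro j hj
  by_cases hjP : j < pvP s k t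
  · exact hPlt j hjP
  · exact c j (by omega) hj

-- the whole inner fold: A's (left, best) state vs B's best-only state
theorem pvLoop (s : List Int) (hm : pvMono s) (k : Int) (hk : 0 ≤ k) :
    ∀ t, t ≤ s.length →
      (List.range t).foldl (fun (st : Nat × Int) (r : Nat) =>
          (funcAdvance s k (s.getD r 0) s.length st.1,
           max st.2 ((r : Int) - ((funcAdvance s k (s.getD r 0) s.length st.1 : Nat) : Int) + 1))) (0, 0)
      = (pvP s k t,
         (List.range t).foldl (fun (best : Int) (r : Nat) =>
            max best ((r : Int) - ((funcAltBisect s (s.getD r 0 - k) r 0 r : Nat) : Int) + 1)) 0) := by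
  intro t
  induction t with
  | zero => intro _; rfl
  | succ t ih =>
    intro h
    rw [List.range_succ]
    simp only [List.foldl_append, List.foldl_cons, List.foldl_nil]
    rw [ih (by omega)]
    rw [pvStep s hm k hk t (by omega)]
    rfl

theorem pvInner_eq (k : Int) (hk : 0 ≤ k) (hs0 : List Int) : funcInner k hs0 = funcAltInner k hs0 := by
  have h := pvLoop (PySem.List.sorted hs0 (fun x => x)) (pvMono_sorted hs0) k hk
    (PySem.List.sorted hs0 (fun x => x)).length (le_refl _)
  simp only [funcInner, funcAltInner]
  rw [h]

-- the heights recorded for position c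
def pvHeights (pts : List (Int × Int)) (c : Int) : List Int :=
  (pts.filter (fun p => p.1 == c)).map (fun x => x.2)

-- the grouping dict (setdefault/append = modify with default []), as items over deduped positions
theorem pvGroup_items (pts : List (Int × Int)) :
    (pts.foldl (fun (d : PySem.Dict Int (List Int)) p =>
        d.modify p.1 [] (fun x => x ++ [p.2])) PySem.Dict.empty).items
    = (PySem.Set.ofList (pts.map Prod.fst)).map (fun c => (c, pvHeights pts c)) := by
  have hnd : (pts.foldl (fun (d : PySem.Dict Int (List Int)) (p : Int × Int) =>
      d.modify p.1 [] (fun x => x ++ [p.2])) PySem.Dict.empty).keys.Nodup := by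
    exact PySem.Dict.nodup_keys_foldl_modify_key pts Prod.fst [] (fun _ p v => v ++ [p.2])
      PySem.Dict.empty (by simp)
  rw [PySem.Dict.items_eq_map_keys _ hnd []]
  have hkeys : (pts.foldl (fun (d : PySem.Dict Int (List Int)) (p : Int × Int) =>
      d.modify p.1 [] (fun x => x ++ [p.2])) PySem.Dict.empty).keys
      = PySem.Set.ofList (pts.map Prod.fst) := by
    have := PySem.Dict.keys_foldl_modify_key pts Prod.fst [] (fun _ p v => v ++ [p.2])
      PySem.Dict.empty
    simpa using this
  rw [hkeys]
  apply List.map_congr_left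
  intro c _
  rw [PySem.Dict.getD_foldl_modify_append]
  simp [pvHeights]

theorem pvFoldl_range_getD {α : Type} (f : α → (Int × Int) → α) (d : Int × Int) :
    ∀ (n : Nat) (xs : List (Int × Int)) (init : α), n ≤ xs.length →
      (List.range n).foldl (fun acc j => f acc (xs.getD j d)) init = (xs.take n).foldl f init := by
  intro n
  induction n with
  | zero => intro xs init _; rfl
  | succ n ih =>
    intro xs init h
    rw [List.range_succ, List.foldl_append]
    rw [ih xs init (by omega)]
    have hn : n < xs.length := by omega
    rw [List.take_add_one, List.foldl_append]
    simp [List.getElem?_eq_getElem hn]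

-- A's membership-test-then-append step is the same dict step as setdefault/append
theorem pvDictStep_eq (d : PySem.Dict Int (List Int)) (ph : Int × Int) :
    funcDictStep d ph = d.modify ph.1 [] (fun hs => hs ++ [ph.2]) := by
  unfold funcDictStep
  by_cases hc : d.contains ph.1 = true
  · simp only [if_pos hc]
  · simp only [if_neg hc]
    have h1 : (d.insert ph.1 ([] : List Int)).modify ph.1 [] (fun hs => hs ++ [ph.2])
        = (d.insert ph.1 ([] : List Int)).insert ph.1
            ((d.insert ph.1 ([] : List Int)).getD ph.1 [] ++ [ph.2]) := rfl
    have h2 : d.modify ph.1 [] (fun hs => hs ++ [ph.2])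
        = d.insert ph.1 (d.getD ph.1 [] ++ [ph.2]) := rfl
    rw [h1, h2, PySem.Dict.getD_insert_self, PySem.Dict.insert_insert_self,
        PySem.Dict.getD_of_not_contains _ _ (by simpa using hc)]

theorem pvA_eq (n m k : Int) (apples : List (Int × Int)) (hm : m.toNat ≤ apples.length) :
    func n m k apples
    = ((PySem.Set.ofList ((apples.take m.toNat).map Prod.fst)).map
        (fun c => funcInner k (pvHeights (apples.take m.toNat) c))).sum := by
  simp only [func]
  rw [PySem.List.pyRange_one, List.foldl_map]
  simp only [zero_add, PySem.List.pyGetD_natCast, Int.sub_zero]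
  rw [pvFoldl_range_getD funcDictStep ((0 : Int), (0 : Int)) m.toNat apples PySem.Dict.empty hm]
  rw [PySem.List.foldl_congr_mem _ funcDictStep
    (fun (d : PySem.Dict Int (List Int)) (p : Int × Int) =>
      d.modify p.1 [] (fun x => x ++ [p.2]))
    PySem.Dict.empty (fun acc x _ => pvDictStep_eq acc x)]
  rw [pvGroup_items]
  rw [PySem.List.foldl_add]
  simp [List.map_map, Function.comp_def]

theorem pvB_eq (n m k : Int) (apples : List (Int × Int)) (hm : m.toNat ≤ apples.length) :
    func_alt n m k apples
    = ((PySem.Set.ofList ((apples.take m.toNat).map Prod.fst)).map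
        (fun c => funcAltInner k (pvHeights (apples.take m.toNat) c))).sum := by
  simp only [func_alt]
  rw [PySem.List.pyRange_one, List.foldl_map]
  simp only [zero_add, PySem.List.pyGetD_natCast, Int.sub_zero]
  rw [pvFoldl_range_getD (fun (d : PySem.Dict Int (List Int)) (p : Int × Int) =>
      d.modify p.1 [] (fun x => x ++ [p.2])) ((0 : Int), (0 : Int)) m.toNat apples
      PySem.Dict.empty hm]
  simp only [PySem.Dict.values]
  rw [pvGroup_items]
  rw [PySem.List.foldl_add]
  simp [List.map_map, Function.comp_def]

-- ===== VERDICT (by name: the statement is the Claim_ definition above) =====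
theorem func_spec : Claim_equal_func := by
  intro n m k apples _ hpre
  obtain ⟨hm, hk⟩ := hpre
  have hm' : m.toNat ≤ apples.length := by omega
  show func n m k apples = func_alt n m k apples
  rw [pvA_eq n m k apples hm', pvB_eq n m k apples hm']
  rcases hk with hk | hk
  · have h0 : m.toNat = 0 := by omega
    simp [h0]
  · exact congrArg List.sum (List.map_congr_left (fun c _ => pvInner_eq k hk _))
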